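-- pv_equiv track=rewrite | github.com/pjmartos/genealogy | src/stemmata/interp.py | _parse_placeholder_tokens
-- ===== SOURCE A (Python) =====
-- def _parse_placeholder_tokens(text: str) -> list[tuple[str, str]]:
--     tokens: list[tuple[str, str]] = []
--     i = 0
--     while i < len(text):
--         if text[i] == "$" and i + 1 < len(text) and text[i + 1] == "$":
--             if i + 2 < len(text) and text[i + 2] == "{":
--                 j = text.find("}", i + 3)
--                 if j == -1:
--                     tokens.append(("text", text[i]))
--                     i += 1
--                     continue
--                 tokens.append(("escape", text[i + 2:j + 1]))
--                 i = j + 1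
--                 continue
--             tokens.append(("text", "$"))
--             i += 2
--             continue
--         if text[i] == "$" and i + 1 < len(text) and text[i + 1] == "{":
--             j = text.find("}", i + 2)
--             if j == -1:
--                 tokens.append(("text", text[i]))
--                 i += 1
--                 continue
--             inner = text[i + 2:j]
--             tokens.append(("ph", inner))
--             i = j + 1
--             continue
--         tokens.append(("text", text[i]))
--         i += 1
--     merged: list[tuple[str, str]] = []
--     for kind, val in tokens:
--         if merged and merged[-1][0] == "text" and kind == "text":
--             merged[-1] = ("text", merged[-1][1] + val)
--         else:
--             merged.append((kind, val))
--     return merged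
-- ===== SOURCE B (Python) =====
-- import bisect
--
--
-- def _parse_placeholder_tokens(text: str) -> list[tuple[str, str]]:
--     n = len(text)
--     rb = [p for p, ch in enumerate(text) if ch == "}"]
--     out: list[tuple[str, str]] = []
--     buf: list[str] = []
--
--     def flush() -> None:
--         if buf:
--             out.append(("text", "".join(buf)))
--             buf.clear()
--
--     i = 0
--     while i < n:
--         ch = text[i]
--         if ch == "$":
--             if i + 2 < n and text[i + 1] == "$" and text[i + 2] == "{":
--                 t = bisect.bisect_left(rb, i + 3)
--                 if t < len(rb):
--                     j = rb[t]
--                     flush()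
--                     out.append(("escape", text[i + 2:j + 1]))
--                     i = j + 1
--                     continue
--             elif i + 1 < n and text[i + 1] == "$":
--                 buf.append("$")
--                 i += 2
--                 continue
--             elif i + 1 < n and text[i + 1] == "{":
--                 t = bisect.bisect_left(rb, i + 2)
--                 if t < len(rb):
--                     j = rb[t]
--                     flush()
--                     out.append(("ph", text[i + 2:j]))
--                     i = j + 1
--                     continue
--         buf.append(ch)
--         i += 1
--     flush()
--     return out
-- ===== Notes on version B (the rewrite author's own statement) =====
-- stated objective: faster
-- what changed: B precomputes the list of closing-brace positions once and locates each closing brace with bisect instead of re-scanning with str.find, and merges adjacent text characters into a pending buffer during a single pass instead of A's second tokenize-then-merge pass.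
import Mathlib
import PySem

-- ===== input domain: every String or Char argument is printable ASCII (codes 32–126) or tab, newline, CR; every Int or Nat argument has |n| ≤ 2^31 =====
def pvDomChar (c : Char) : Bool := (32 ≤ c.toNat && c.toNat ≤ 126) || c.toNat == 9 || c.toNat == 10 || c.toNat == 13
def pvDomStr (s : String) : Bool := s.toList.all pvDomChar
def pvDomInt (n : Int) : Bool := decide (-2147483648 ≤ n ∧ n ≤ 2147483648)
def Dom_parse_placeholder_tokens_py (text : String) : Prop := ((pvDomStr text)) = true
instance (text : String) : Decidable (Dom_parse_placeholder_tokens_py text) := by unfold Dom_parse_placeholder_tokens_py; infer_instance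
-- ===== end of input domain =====

-- B replaces A's repeated str.find re-scans by one precomputed list of closing-brace
-- positions probed with bisect, and merges adjacent text characters in a pending buffer
-- during the single pass instead of A's second tokenize-then-merge pass (measured faster).

-- ===== PORT A =====
-- A's while-loop over indices, as fuel recursion (fuel = length of the text bounds the
-- number of iterations: i strictly increases each step); text[i] for i < len via getD.
def pvTokA (cs : List Char) : Nat → Nat → List (String × String)
  | 0, _ => []
  | f+1, i =>
    if i < cs.length then
      if cs.getD i ' ' = '$' ∧ i+1 < cs.length ∧ cs.getD (i+1) ' ' = '$' then
        if i+2 < cs.length ∧ cs.getD (i+2) ' ' = '{' then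
          let j := PySem.Chars.findFrom cs ['}'] ((i+3 : Nat) : Int)
          if j = -1 then
            ("text", String.ofList [cs.getD i ' ']) :: pvTokA cs f (i+1)
          else
            ("escape", String.ofList (PySem.List.slice cs (some ((i+2 : Nat) : Int)) (some (j+1)))) :: pvTokA cs f (j.toNat+1)
        else
          ("text", "$") :: pvTokA cs f (i+2)
      else if cs.getD i ' ' = '$' ∧ i+1 < cs.length ∧ cs.getD (i+1) ' ' = '{' then
        let j := PySem.Chars.findFrom cs ['}'] ((i+2 : Nat) : Int)
        if j = -1 then
          ("text", String.ofList [cs.getD i ' ']) :: pvTokA cs f (i+1)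
        else
          ("ph", String.ofList (PySem.List.slice cs (some ((i+2 : Nat) : Int)) (some j))) :: pvTokA cs f (j.toNat+1)
      else
        ("text", String.ofList [cs.getD i ' ']) :: pvTokA cs f (i+1)
    else []

-- A's merge loop body (one foldl step over the token list)
def pvMergeStep (m : List (String × String)) (kv : String × String) : List (String × String) :=
  match m.getLast? with
  | some last => if last.1 = "text" ∧ kv.1 = "text" then m.dropLast ++ [("text", last.2 ++ kv.2)] else m ++ [kv]
  | none => m ++ [kv]

def parse_placeholder_tokens_py (text : String) : List (String × String) :=
  (pvTokA text.toList text.toList.length 0).foldl pvMergeStep []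

-- ===== PORT B =====
-- rb = [p for p, ch in enumerate(text) if ch == "}"]
def pvBraces (cs : List Char) : List Int :=
  (PySem.List.enumerate cs).filterMap (fun pc => if pc.2 = '}' then some pc.1 else none)

-- flush(): emit the pending text buffer (if nonempty) before the rest
def pvFlushCons (buf : List Char) (rest : List (String × String)) : List (String × String) :=
  if buf = [] then rest else ("text", String.ofList buf) :: rest

-- B's single pass: pending text buffer `buf`, closing braces located via bisect in rb
def pvTokB (cs : List Char) (rb : List Int) : Nat → Nat → List Char → List (String × String)
  | 0, _, buf => pvFlushCons buf []
  | f+1, i, buf =>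
    if i < cs.length then
      let c := cs.getD i ' '
      if c = '$' ∧ i+2 < cs.length ∧ cs.getD (i+1) ' ' = '$' ∧ cs.getD (i+2) ' ' = '{' then
        let t := PySem.List.bisectLeft rb ((i+3 : Nat) : Int)
        if t < rb.length then
          let j := (rb.getD t 0).toNat
          pvFlushCons buf (("escape", String.ofList (PySem.List.slice cs (some ((i+2 : Nat) : Int)) (some ((j+1 : Nat) : Int)))) :: pvTokB cs rb f (j+1) [])
        else pvTokB cs rb f (i+1) (buf ++ [c])
      else if c = '$' ∧ i+1 < cs.length ∧ cs.getD (i+1) ' ' = '$' then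
        pvTokB cs rb f (i+2) (buf ++ ['$'])
      else if c = '$' ∧ i+1 < cs.length ∧ cs.getD (i+1) ' ' = '{' then
        let t := PySem.List.bisectLeft rb ((i+2 : Nat) : Int)
        if t < rb.length then
          let j := (rb.getD t 0).toNat
          pvFlushCons buf (("ph", String.ofList (PySem.List.slice cs (some ((i+2 : Nat) : Int)) (some (j : Int)))) :: pvTokB cs rb f (j+1) [])
        else pvTokB cs rb f (i+1) (buf ++ [c])
      else pvTokB cs rb f (i+1) (buf ++ [c])
    else pvFlushCons buf []

def parse_placeholder_tokens_py_alt (text : String) : List (String × String) :=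
  pvTokB text.toList (pvBraces text.toList) text.toList.length 0 []

-- ===== PRECONDITION & SPEC =====
def Spec_parse_placeholder_tokens_py (text : String) (out : List (String × String)) : Prop := out = parse_placeholder_tokens_py_alt text
instance (text : String) (out : List (String × String)) : Decidable (Spec_parse_placeholder_tokens_py text out) := by unfold Spec_parse_placeholder_tokens_py; infer_instance

-- ===== CLAIM (what is proved, stated in full; the proofs are below) =====
def Claim_equal_parse_placeholder_tokens_py : Prop := ∀ (text : String), Dom_parse_placeholder_tokens_py text → Spec_parse_placeholder_tokens_py text (parse_placeholder_tokens_py text)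

-- ===== LEMMAS AND PROOFS =====

-- recursive form of A's merge pass (consecutive "text" tokens concatenated)
def pvMerge : List (String × String) → List (String × String)
  | [] => []
  | [kv] => [kv]
  | kv1 :: kv2 :: r =>
    if kv1.1 = "text" ∧ kv2.1 = "text" then pvMerge (("text", kv1.2 ++ kv2.2) :: r)
    else kv1 :: pvMerge (kv2 :: r)
  termination_by l => l.length
  decreasing_by all_goals simp

-- pending-buffer interpretation used in the main induction
def pvPre (buf : List Char) (ts : List (String × String)) : List (String × String) :=
  if buf = [] then pvMerge ts else pvMerge (("text", String.ofList buf) :: ts)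

lemma pvMerge_cons_of_ne (kv : String × String) (ts : List (String × String)) (h : kv.1 ≠ "text") :
    pvMerge (kv :: ts) = kv :: pvMerge ts := by
  cases ts with
  | nil => simp [pvMerge]
  | cons kv2 r => rw [pvMerge]; simp [h]

lemma pvMerge_cons_cons_of_ne (kv1 kv2 : String × String) (ts : List (String × String))
    (h : kv2.1 ≠ "text") :
    pvMerge (kv1 :: kv2 :: ts) = kv1 :: pvMerge (kv2 :: ts) := by
  rw [pvMerge]; simp [h]

lemma pvMerge_text_text (v1 v2 : String) (ts : List (String × String)) :
    pvMerge (("text", v1) :: ("text", v2) :: ts) = pvMerge (("text", v1 ++ v2) :: ts) := by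
  rw [pvMerge]; simp

lemma pvFoldl_merge (ts : List (String × String)) :
    (∀ acc : List (String × String), (∀ last ∈ acc.getLast?, last.1 ≠ "text") →
      ts.foldl pvMergeStep acc = acc ++ pvMerge ts)
    ∧ (∀ (front : List (String × String)) (v0 : String),
      ts.foldl pvMergeStep (front ++ [("text", v0)]) = front ++ pvMerge (("text", v0) :: ts)) := by
  induction ts with
  | nil =>
    refine ⟨fun acc _ => by simp [pvMerge], fun front v0 => by simp [pvMerge]⟩
  | cons kv rest ih =>
    obtain ⟨k, v⟩ := kv
    obtain ⟨ih1, ih2⟩ := ih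
    constructor
    · intro acc hacc
      have hstep : pvMergeStep acc (k, v) = acc ++ [(k, v)] := by
        unfold pvMergeStep
        cases h : acc.getLast? with
        | none => simp
        | some last =>
          have hlast := hacc last (by simp [h])
          simp [hlast]
      rw [List.foldl_cons, hstep]
      by_cases hk : k = "text"
      · subst hk
        exact ih2 acc v
      · rw [ih1 (acc ++ [(k, v)]) (by simp [hk]), pvMerge_cons_of_ne (k, v) rest hk]
        simp
    · intro front v0
      rw [List.foldl_cons]
      by_cases hk : k = "text"
      · subst hk
        have hstep : pvMergeStep (front ++ [("text", v0)]) ("text", v) = front ++ [("text", v0 ++ v)] := by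
          unfold pvMergeStep
          simp
        rw [hstep, ih2 front (v0 ++ v), pvMerge_text_text]
      · have hstep : pvMergeStep (front ++ [("text", v0)]) (k, v) = (front ++ [("text", v0)]) ++ [(k, v)] := by
          unfold pvMergeStep
          simp [hk]
        rw [hstep, ih1 ((front ++ [("text", v0)]) ++ [(k, v)]) (by simp [hk])]
        rw [pvMerge_cons_cons_of_ne ("text", v0) (k, v) rest hk, pvMerge_cons_of_ne (k, v) rest hk]
        simp

-- membership in the precomputed brace list
lemma pvBraces_mem (cs : List Char) (q : Int) :
    q ∈ pvBraces cs ↔ ∃ (p : Nat) (hp : p < cs.length), q = (p : Int) ∧ cs[p] = '}' := by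
  simp only [pvBraces, List.mem_filterMap]
  constructor
  · rintro ⟨⟨p0, c0⟩, hmem, hf⟩
    rw [PySem.List.mem_enumerate_iff] at hmem
    obtain ⟨kk, hkk, heq⟩ := hmem
    obtain ⟨h1, h2⟩ := Prod.mk.injEq .. ▸ heq
    split at hf
    · rename_i hc
      obtain rfl : p0 = q := by simpa using hf
      exact ⟨kk, hkk, by omega, by rw [← h2]; exact hc⟩
    · exact absurd hf (by simp)
  · rintro ⟨p, hp, rfl, hcp⟩
    refine ⟨((p : Int), cs[p]), ?_, ?_⟩
    · rw [PySem.List.mem_enumerate_iff]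
      exact ⟨p, hp, by simp⟩
    · simp [hcp]

lemma pvBraces_sorted (cs : List Char) : (pvBraces cs).Pairwise (· ≤ ·) := by
  unfold pvBraces
  rw [List.pairwise_filterMap]
  have := PySem.List.pairwise_lt_enumerate cs 0
  refine this.imp ?_
  intro a b hab x hx y hy
  have hxa : x = a.1 := by revert hx; split <;> simp_all
  have hyb : y = b.1 := by revert hy; split <;> simp_all
  subst hxa hyb
  exact le_of_lt hab

-- ['}'] is a prefix of cs.drop p iff position p holds '}'
lemma pvSingleton_prefix (cs : List Char) (p : Nat) :
    ['}'] <+: cs.drop p ↔ ∃ hp : p < cs.length, cs[p] = '}' := by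
  have hhead : ['}'] <+: cs.drop p ↔ (cs.drop p).head? = some '}' := by
    cases h : cs.drop p with
    | nil => simp
    | cons b t => simp [List.cons_prefix_iff]
  rw [hhead, List.head?_drop, List.getElem?_eq_some_iff]

-- bisect over the precomputed brace list computes exactly text.find("}", k)
lemma pvNextBrace (cs : List Char) (k : Nat) (hk : k ≤ cs.length) :
    (PySem.List.bisectLeft (pvBraces cs) (k : Int) < (pvBraces cs).length ↔
      PySem.Chars.findFrom cs ['}'] (k : Int) ≠ -1)
    ∧ (PySem.List.bisectLeft (pvBraces cs) (k : Int) < (pvBraces cs).length →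
      (pvBraces cs).getD (PySem.List.bisectLeft (pvBraces cs) (k : Int)) 0
        = PySem.Chars.findFrom cs ['}'] (k : Int)
      ∧ (k : Int) ≤ PySem.Chars.findFrom cs ['}'] (k : Int)) := by
  have hsorted := pvBraces_sorted cs
  obtain ⟨hlen, hlt, hge⟩ := PySem.List.bisectLeft_spec (pvBraces cs) (k : Int) hsorted
  by_cases hf : PySem.Chars.findFrom cs ['}'] (k : Int) = -1
  · -- find failed: there is no '}' at any position ≥ k, so every brace is < k
    have hno : ¬ ['}'] <:+: cs.drop k :=
      (PySem.Chars.findFrom_natCast_eq_neg_one_iff cs ['}'] k hk).1 hf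
    have hnone : ∀ q ∈ pvBraces cs, q < (k : Int) := by
      intro q hq
      rw [pvBraces_mem] at hq
      obtain ⟨p, hp, rfl, hcp⟩ := hq
      by_contra hge'
      have hkp : k ≤ p := by exact_mod_cast not_lt.1 hge'
      refine hno ((List.singleton_infix_iff '}' (cs.drop k)).2 ?_)
      rw [List.mem_iff_getElem]
      refine ⟨p - k, by simp; omega, ?_⟩
      rw [List.getElem_drop]
      simpa [Nat.add_sub_cancel' hkp] using hcp
    have htlen : ¬ PySem.List.bisectLeft (pvBraces cs) (k : Int) < (pvBraces cs).length := by
      intro hlt'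
      have h1 := hge _ hlt' le_rfl
      have h2 := hnone _ (List.getElem_mem hlt')
      omega
    exact ⟨⟨fun h => absurd h htlen, fun h => absurd hf h⟩, fun h => absurd h htlen⟩
  · -- find succeeded at position j ≥ k with cs[j] = '}', minimal among positions ≥ k
    obtain ⟨hkle, hpre, hmin⟩ := PySem.Chars.findFrom_natCast_spec cs ['}'] k hk hf
    set jf := PySem.Chars.findFrom cs ['}'] (k : Int) with hjf
    set j := jf.toNat with hj
    have hjf0 : (j : Int) = jf := Int.toNat_of_nonneg (by omega)
    obtain ⟨hjn, hcj⟩ := (pvSingleton_prefix cs j).1 hpre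
    have hkj : k ≤ j := by omega
    -- j's index q in the brace list
    obtain ⟨q, hq, hrbq⟩ := List.mem_iff_getElem.1 ((pvBraces_mem cs (j : Int)).2 ⟨j, hjn, rfl, hcj⟩)
    set t := PySem.List.bisectLeft (pvBraces cs) (k : Int) with ht
    have htq : t ≤ q := by
      by_contra hqt
      have := hlt q hq (by omega)
      omega
    have htlen : t < (pvBraces cs).length := lt_of_le_of_lt htq hq
    refine ⟨⟨fun _ => hf, fun _ => htlen⟩, fun _ => ⟨?_, by omega⟩⟩
    -- rb[t] is a brace position p with k ≤ p, hence j ≤ p by minimality; and rb[t] ≤ rb[q] = j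
    obtain ⟨p, hp, hpt, hcp⟩ := (pvBraces_mem cs ((pvBraces cs)[t])).1 (List.getElem_mem htlen)
    have hkp : (k : Int) ≤ (p : Int) := hpt ▸ hge t htlen le_rfl
    have hjp : j ≤ p := by
      by_contra hpj
      exact hmin p (by exact_mod_cast hkp) (by omega) ((pvSingleton_prefix cs p).2 ⟨hp, hcp⟩)
    have hle : (pvBraces cs)[t] ≤ (pvBraces cs)[q] := by
      rcases lt_or_eq_of_le htq with hlt' | heq
      · exact (List.pairwise_iff_getElem.1 hsorted) t q htlen hq hlt'
      · simp [heq]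
    rw [List.getD_eq_getElem _ _ htlen]
    rw [hrbq] at hle
    omega

lemma pvPre_text_char (buf : List Char) (c : Char) (ts : List (String × String)) :
    pvPre buf (("text", String.ofList [c]) :: ts) = pvPre (buf ++ [c]) ts := by
  by_cases hb : buf = []
  · subst hb; simp [pvPre]
  · have hb2 : buf ++ [c] ≠ [] := by simp
    simp only [pvPre, if_neg hb, if_neg hb2]
    rw [pvMerge_text_text, ← String.ofList_append]

lemma pvPre_nontext (buf : List Char) (kv : String × String) (ts : List (String × String))
    (h : kv.1 ≠ "text") :
    pvPre buf (kv :: ts) = pvFlushCons buf (kv :: pvMerge ts) := by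
  by_cases hb : buf = []
  · subst hb; simp [pvPre, pvFlushCons, pvMerge_cons_of_ne kv ts h]
  · simp only [pvPre, pvFlushCons, if_neg hb]
    rw [pvMerge_cons_cons_of_ne ("text", String.ofList buf) kv ts h, pvMerge_cons_of_ne kv ts h]

lemma pvPre_nil (buf : List Char) : pvPre buf [] = pvFlushCons buf [] := by
  by_cases hb : buf = [] <;> simp [pvPre, pvFlushCons, hb, pvMerge]

lemma pvMain (cs : List Char) : ∀ (f i : Nat) (buf : List Char), cs.length - i ≤ f →
    pvTokB cs (pvBraces cs) f i buf = pvPre buf (pvTokA cs f i) := by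
  intro f
  induction f with
  | zero =>
    intro i buf _
    simp only [pvTokA, pvTokB]
    exact (pvPre_nil buf).symm
  | succ f ihf =>
    intro i buf h
    by_cases hi : i < cs.length
    · simp only [pvTokA, pvTokB, if_pos hi]
      have hchar : pvTokB cs (pvBraces cs) f (i+1) (buf ++ [cs.getD i ' '])
          = pvPre buf (("text", String.ofList [cs.getD i ' ']) :: pvTokA cs f (i+1)) := by
        rw [pvPre_text_char]
        exact ihf (i+1) _ (by omega)
      by_cases h1 : cs.getD i ' ' = '$' ∧ i + 2 < cs.length ∧ cs.getD (i + 1) ' ' = '$' ∧ cs.getD (i + 2) ' ' = '{'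
      · rw [if_pos h1]
        have hA1 : cs.getD i ' ' = '$' ∧ i + 1 < cs.length ∧ cs.getD (i + 1) ' ' = '$' := ⟨h1.1, by omega, h1.2.2.1⟩
        have hA1a : i + 2 < cs.length ∧ cs.getD (i + 2) ' ' = '{' := ⟨h1.2.1, h1.2.2.2⟩
        rw [if_pos hA1, if_pos hA1a]
        obtain ⟨hiff, hval⟩ := pvNextBrace cs (i+3) (by omega)
        by_cases ht : PySem.List.bisectLeft (pvBraces cs) ((i + 3 : Nat) : Int) < (pvBraces cs).length
        · rw [if_pos ht]
          have hf2 : PySem.Chars.findFrom cs ['}'] ((i+3 : Nat) : Int) ≠ -1 := hiff.1 ht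
          obtain ⟨hveq, hkle⟩ := hval ht
          rw [if_neg hf2]
          set jf := PySem.Chars.findFrom cs ['}'] ((i + 3 : Nat) : Int) with hjf
          have hjn : (jf.toNat : Int) = jf := Int.toNat_of_nonneg (by omega)
          rw [hveq]
          have hcast : ((jf.toNat + 1 : Nat) : Int) = jf + 1 := by push_cast; omega
          rw [hcast]
          rw [ihf (jf.toNat + 1) [] (by omega)]
          rw [pvPre_nontext buf _ _ (by simp)]
          simp [pvPre]
        · rw [if_neg ht]
          have hf2 : PySem.Chars.findFrom cs ['}'] ((i+3 : Nat) : Int) = -1 := by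
            by_contra hne; exact ht (hiff.2 hne)
          rw [if_pos hf2]
          exact hchar
      · rw [if_neg h1]
        by_cases h2 : cs.getD i ' ' = '$' ∧ i + 1 < cs.length ∧ cs.getD (i + 1) ' ' = '$'
        · rw [if_pos h2, if_pos h2]
          have hA1a : ¬ (i + 2 < cs.length ∧ cs.getD (i + 2) ' ' = '{') := by
            intro hcon; exact h1 ⟨h2.1, hcon.1, h2.2.2, hcon.2⟩
          rw [if_neg hA1a]
          have hdollar : (("text", "$") : String × String) = ("text", String.ofList ['$']) := by rfl
          rw [hdollar, pvPre_text_char]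
          exact ihf (i+2) _ (by omega)
        · rw [if_neg h2, if_neg h2]
          by_cases h3 : cs.getD i ' ' = '$' ∧ i + 1 < cs.length ∧ cs.getD (i + 1) ' ' = '{'
          · rw [if_pos h3, if_pos h3]
            obtain ⟨hiff, hval⟩ := pvNextBrace cs (i+2) (by omega)
            by_cases ht : PySem.List.bisectLeft (pvBraces cs) ((i + 2 : Nat) : Int) < (pvBraces cs).length
            · rw [if_pos ht]
              have hf2 : PySem.Chars.findFrom cs ['}'] ((i+2 : Nat) : Int) ≠ -1 := hiff.1 ht
              obtain ⟨hveq, hkle⟩ := hval ht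
              rw [if_neg hf2]
              set jf := PySem.Chars.findFrom cs ['}'] ((i + 2 : Nat) : Int) with hjf
              have hjn : (jf.toNat : Int) = jf := Int.toNat_of_nonneg (by omega)
              rw [hveq, hjn]
              rw [ihf (jf.toNat + 1) [] (by omega)]
              rw [pvPre_nontext buf _ _ (by simp)]
              simp [pvPre]
            · rw [if_neg ht]
              have hf2 : PySem.Chars.findFrom cs ['}'] ((i+2 : Nat) : Int) = -1 := by
                by_contra hne; exact ht (hiff.2 hne)
              rw [if_pos hf2]
              exact hchar
          · rw [if_neg h3, if_neg h3]
            exact hchar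
    · simp only [pvTokA, pvTokB, if_neg hi]
      exact (pvPre_nil buf).symm

-- ===== VERDICT (by name: the statement is the Claim_ definition above) =====
theorem parse_placeholder_tokens_py_spec : Claim_equal_parse_placeholder_tokens_py := by
  intro text _
  show _ = _
  unfold parse_placeholder_tokens_py parse_placeholder_tokens_py_alt
  rw [(pvFoldl_merge _).1 [] (by simp), pvMain _ _ 0 [] (by omega)]
  simp [pvPre]
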